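-- pv_equiv track=rewrite | github.com/trevor-nichols/openai-agents-saas-starter | anything-agents/app/api/dependencies/tenant.py | _role_from_scopes
-- ===== SOURCE A (Python) =====
-- from collections.abc import Iterable, Sequence
-- from enum import Enum
-- from typing import Any
--
-- class TenantRole(str, Enum):
--     OWNER = "owner"
--     ADMIN = "admin"
--     VIEWER = "viewer"
--
-- _ROLE_PRIORITY: dict[TenantRole, int] = {
--     TenantRole.VIEWER: 1,
--     TenantRole.ADMIN: 2,
--     TenantRole.OWNER: 3,
-- }
--
-- def _role_from_scopes(scope_claim: Any) -> TenantRole | None: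
--     scopes: Iterable[str] = []
--     if isinstance(scope_claim, str):
--         scopes = scope_claim.split()
--     elif isinstance(scope_claim, Sequence):
--         scopes = [str(item) for item in scope_claim]
--
--     resolved: TenantRole | None = None
--     for scope in scopes:
--         normalized = scope.lower().strip()
--         if normalized == "billing:manage":
--             resolved = _max_role(resolved, TenantRole.OWNER)
--         elif normalized == "billing:read":
--             resolved = _max_role(resolved, TenantRole.VIEWER)
--     return resolved
--
-- def _max_role(current: TenantRole | None, candidate: TenantRole | None) -> TenantRole | None:
--     if candidate is None:
--         return current
--     if current is None:
--         return candidate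
--     if _ROLE_PRIORITY[candidate] > _ROLE_PRIORITY[current]:
--         return candidate
--     return current
-- ===== SOURCE B (Python) =====
-- from collections.abc import Sequence
-- from enum import Enum
-- from typing import Any
--
--
-- class TenantRole(str, Enum):
--     OWNER = "owner"
--     ADMIN = "admin"
--     VIEWER = "viewer"
--
--
-- def _role_from_scopes(scope_claim: Any):
--     if isinstance(scope_claim, str):
--         scopes = scope_claim.split()
--     elif isinstance(scope_claim, Sequence):
--         scopes = [str(item) for item in scope_claim]
--     else:
--         scopes = []
--     normalized = {s.lower().strip() for s in scopes}
--     if "billing:manage" in normalized: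
--         return TenantRole.OWNER
--     if "billing:read" in normalized:
--         return TenantRole.VIEWER
--     return None
-- ===== Notes on version B (the rewrite author's own statement) =====
-- stated objective: simpler
-- what changed: Replaced the accumulator fold with _max_role and the _ROLE_PRIORITY map by building the normalized scope set once and doing priority-ordered short-circuit membership checks (OWNER before VIEWER).
import Mathlib
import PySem

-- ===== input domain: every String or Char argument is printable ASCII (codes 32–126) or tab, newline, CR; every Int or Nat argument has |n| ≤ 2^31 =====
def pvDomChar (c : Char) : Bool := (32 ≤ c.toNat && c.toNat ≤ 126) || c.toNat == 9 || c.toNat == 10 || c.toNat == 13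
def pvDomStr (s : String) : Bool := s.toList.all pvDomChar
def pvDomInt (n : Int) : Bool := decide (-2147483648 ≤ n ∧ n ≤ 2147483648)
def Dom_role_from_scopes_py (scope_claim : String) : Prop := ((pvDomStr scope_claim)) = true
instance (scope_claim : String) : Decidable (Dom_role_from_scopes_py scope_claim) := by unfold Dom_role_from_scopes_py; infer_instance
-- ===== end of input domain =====

-- B replaces A's fold with _max_role over _ROLE_PRIORITY by one normalized scope set and
-- priority-ordered membership checks (owner before viewer); same return value, simpler.
-- The Lean signature fixes scope_claim : String, so only the str branch of the Python is reachable.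

-- ===== PORT A =====
-- _ROLE_PRIORITY as an association list (dict in insertion order)
def pvRolePriority : PySem.Dict String Int := PySem.Dict.ofList [("viewer", 1), ("admin", 2), ("owner", 3)]

-- _max_role(current, candidate)
def pvMaxRole (current candidate : Option String) : Option String :=
  match candidate with
  | none => current
  | some c =>
    match current with
    | none => some c
    | some cur =>
      if pvRolePriority.getD cur 0 < pvRolePriority.getD c 0 then some c else some cur

def role_from_scopes_py (scope_claim : String) : Option String :=
  let scopes := PySem.Str.split₀ scope_claim
  scopes.foldl (fun resolved scope =>
    let normalized := PySem.Str.strip (PySem.Str.lower scope)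
    if normalized = "billing:manage" then pvMaxRole resolved (some "owner")
    else if normalized = "billing:read" then pvMaxRole resolved (some "viewer")
    else resolved) none

-- ===== PORT B =====
def role_from_scopes_py_alt (scope_claim : String) : Option String :=
  let normalized : PySem.Set String :=
    PySem.Set.ofList ((PySem.Str.split₀ scope_claim).map (fun s => PySem.Str.strip (PySem.Str.lower s)))
  if PySem.Set.contains normalized "billing:manage" then some "owner"
  else if PySem.Set.contains normalized "billing:read" then some "viewer"
  else none

-- ===== PRECONDITION & SPEC =====
def Spec_role_from_scopes_py (scope_claim : String) (out : Option String) : Prop := out = role_from_scopes_py_alt scope_claim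
instance (scope_claim : String) (out : Option String) : Decidable (Spec_role_from_scopes_py scope_claim out) := by unfold Spec_role_from_scopes_py; infer_instance

-- ===== CLAIM (what is proved, stated in full; the proofs are below) =====
def Claim_equal_role_from_scopes_py : Prop := ∀ (scope_claim : String), Dom_role_from_scopes_py scope_claim → Spec_role_from_scopes_py scope_claim (role_from_scopes_py scope_claim)

-- ===== LEMMAS AND PROOFS =====

-- the pure value A's fold computes, as B sees it: check "billing:manage" first, then "billing:read"
def pvPure (l : List String) : Option String :=
  if "billing:manage" ∈ l.map (fun s => PySem.Str.strip (PySem.Str.lower s)) then some "owner"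
  else if "billing:read" ∈ l.map (fun s => PySem.Str.strip (PySem.Str.lower s)) then some "viewer"
  else none

lemma pvPure_cases (l : List String) :
    pvPure l = none ∨ pvPure l = some "owner" ∨ pvPure l = some "viewer" := by
  unfold pvPure; split_ifs <;> simp

lemma pvFold_char (l : List String) (acc : Option String)
    (hacc : acc = none ∨ acc = some "owner" ∨ acc = some "viewer") :
    l.foldl (fun resolved scope =>
      let normalized := PySem.Str.strip (PySem.Str.lower scope)
      if normalized = "billing:manage" then pvMaxRole resolved (some "owner")
      else if normalized = "billing:read" then pvMaxRole resolved (some "viewer")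
      else resolved) acc = pvMaxRole acc (pvPure l) := by
  induction l generalizing acc with
  | nil =>
    rcases hacc with h | h | h <;> subst h <;> rfl
  | cons x xs ih =>
    simp only [List.foldl_cons]
    by_cases hm : PySem.Str.strip (PySem.Str.lower x) = "billing:manage"
    · rw [if_pos hm, ih _ (by rcases hacc with h | h | h <;> subst h <;> decide)]
      have hpure : pvPure (x :: xs) = some "owner" := by
        simp [pvPure, hm]
      rw [hpure]
      rcases pvPure_cases xs with hp | hp | hp <;> rw [hp] <;>
        rcases hacc with h | h | h <;> subst h <;> decide
    · rw [if_neg hm]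
      by_cases hr : PySem.Str.strip (PySem.Str.lower x) = "billing:read"
      · rw [if_pos hr, ih _ (by rcases hacc with h | h | h <;> subst h <;> decide)]
        have hpure : pvPure (x :: xs) = pvMaxRole (some "viewer") (pvPure xs) := by
          unfold pvPure pvMaxRole
          simp only [List.map_cons, List.mem_cons, hr]
          split_ifs <;> first | decide | simp_all
        rw [hpure]
        rcases pvPure_cases xs with hp | hp | hp <;> rw [hp] <;>
          rcases hacc with h | h | h <;> subst h <;> decide
      · rw [if_neg hr, ih _ hacc]
        have hm' : "billing:manage" ≠ PySem.Str.strip (PySem.Str.lower x) := fun h => hm h.symm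
        have hr' : "billing:read" ≠ PySem.Str.strip (PySem.Str.lower x) := fun h => hr h.symm
        have hpure : pvPure (x :: xs) = pvPure xs := by simp [pvPure, hm', hr']
        rw [hpure]

lemma pvMaxRole_none_left (X : Option String) : pvMaxRole none X = X := by
  cases X <;> rfl

-- ===== VERDICT (by name: the statement is the Claim_ definition above) =====
theorem role_from_scopes_py_spec : Claim_equal_role_from_scopes_py := by
  intro s _
  unfold Spec_role_from_scopes_py role_from_scopes_py role_from_scopes_py_alt
  rw [pvFold_char _ none (Or.inl rfl), pvMaxRole_none_left]
  by_cases hM : "billing:manage" ∈ (PySem.Str.split₀ s).map (fun w => PySem.Str.strip (PySem.Str.lower w)) <;>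
    by_cases hR : "billing:read" ∈ (PySem.Str.split₀ s).map (fun w => PySem.Str.strip (PySem.Str.lower w)) <;>
    simp_all [pvPure, PySem.Set.mem_ofList]
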